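-- pv_equiv track=rewrite | github.com/PabloDelBarrioArnanz/Self-Driving-Car-in-Video-Games | utils.py | nn_batchs
-- ===== SOURCE A (Python) =====
-- from typing import Iterable, Sized
--
-- def batch(iterable: Sized, n: int = 1) -> Iterable:
--     """
--     Given a iterable generate batches of size n
--     Input:
--      - Sized that will be batched
--      - n: Integer batch size
--     Output:
--     - Iterable
--     """
--     l: int = len(iterable)
--     for ndx in range(0, l, n):
--         yield iterable[ndx : min(ndx + n, l)]
--
-- def nn_batchs(X: Sized, y: Sized, n: int = 1, sequence_size: int = 5) -> Iterable:
--     """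
--     Given the input examples and the golds generate batches of sequence_size
--     Input:
--      - X: Sized input examples
--      - y: Sized golds
--      - n: Integer batch size
--      -sequence_size: Number of images in a training example. len(x) = len(y) * sequence_size
--     Output:
--     - Iterable
--     """
--
--     assert len(X) == len(y) * sequence_size, (
--         f"Inconsistent data, len(X) must equal len(y)*sequence_size."
--         f" len(X)={len(X)}, len(y)={len(y)}, sequence_size={sequence_size}"
--     )
--     bg_X: Iterable = batch(X, n * sequence_size)
--     bg_y: Iterable = batch(y, n)
--
--     for b_X, bg_y in zip(bg_X, bg_y):
--         yield b_X, bg_y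
-- ===== SOURCE B (Python) =====
-- from typing import Iterable, Sized
--
-- def nn_batchs(X: Sized, y: Sized, n: int = 1, sequence_size: int = 5) -> Iterable:
--     """Consume the two sequences in lockstep: peel a batch-sized prefix off each
--     remainder until y is exhausted (no index arithmetic, no per-batch generators)."""
--     assert len(X) == len(y) * sequence_size, (
--         f"Inconsistent data, len(X) must equal len(y)*sequence_size."
--         f" len(X)={len(X)}, len(y)={len(y)}, sequence_size={sequence_size}"
--     )
--     if n <= 0 or sequence_size <= 0:
--         return
--     rest_X, rest_y = X, y
--     while rest_y:
--         yield rest_X[: n * sequence_size], rest_y[:n]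
--         rest_X, rest_y = rest_X[n * sequence_size :], rest_y[n:]
-- ===== Notes on version B (the rewrite author's own statement) =====
-- stated objective: alternative
-- what changed: Replaces the two independently-stepped batch generators joined by zip with a single while loop that consumes suffixes of X and y in lockstep, peeling a prefix off each remainder per batch (no index arithmetic, no helper generator).
import Mathlib
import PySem

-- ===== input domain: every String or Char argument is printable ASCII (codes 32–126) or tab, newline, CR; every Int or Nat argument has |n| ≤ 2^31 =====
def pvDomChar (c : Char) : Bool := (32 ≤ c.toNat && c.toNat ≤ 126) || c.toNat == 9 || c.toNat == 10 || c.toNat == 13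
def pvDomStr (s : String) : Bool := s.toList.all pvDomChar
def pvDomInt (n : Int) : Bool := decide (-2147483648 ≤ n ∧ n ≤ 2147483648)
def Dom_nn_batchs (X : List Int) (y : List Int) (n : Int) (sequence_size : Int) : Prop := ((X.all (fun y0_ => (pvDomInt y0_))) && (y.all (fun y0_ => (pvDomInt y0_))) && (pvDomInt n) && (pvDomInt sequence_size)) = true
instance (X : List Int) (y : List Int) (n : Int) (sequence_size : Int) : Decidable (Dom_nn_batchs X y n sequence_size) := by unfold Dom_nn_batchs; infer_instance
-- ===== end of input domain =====

-- B replaces the two independently-stepped batch generators joined by zip with a single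
-- while loop that peels a batch-sized prefix off the remainders of X and y in lockstep
-- (same cost; a different decomposition with no index arithmetic).


-- ===== PORT A =====
-- helper `batch(iterable, n)`: yields iterable[ndx : min(ndx+n, l)] for ndx in range(0, l, n)
def batchPy (iterable : List Int) (n : Int) : List (List Int) :=
  let l : Int := iterable.length
  (PySem.List.pyRange 0 l n).map
    (fun ndx => PySem.List.slice iterable (some ndx) (some (min (ndx + n) l)))

def nn_batchs (X : List Int) (y : List Int) (n : Int) (sequence_size : Int) : List (List Int × List Int) :=
  let bg_X := batchPy X (n * sequence_size)
  let bg_y := batchPy y n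
  bg_X.zip bg_y

-- ===== PORT B =====
-- the `while rest_y:` loop: peel a prefix off each remainder per batch.
-- `nn = 0` in the guard is only a totality guard (the caller passes nn > 0);
-- the nss/nn counts are `n * sequence_size` and `n`, exact since the caller
-- takes `.toNat` only under the `0 < n ∧ 0 < sequence_size` guard.
def nnChunks (nss nn : Nat) (restX restY : List Int) : List (List Int × List Int) :=
  if restY = [] ∨ nn = 0 then []
  else (restX.take nss, restY.take nn) ::
       nnChunks nss nn (restX.drop nss) (restY.drop nn)
termination_by restY.length
decreasing_by
  rename_i h
  push Not at h
  have h1 : restY.length ≠ 0 := fun h0 => h.1 (List.eq_nil_of_length_eq_zero h0)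
  simp only [List.length_drop]
  omega

def nn_batchs_alt (X : List Int) (y : List Int) (n : Int) (sequence_size : Int) : List (List Int × List Int) :=
  if 0 < n ∧ 0 < sequence_size then
    nnChunks ((n * sequence_size).toNat) n.toNat X y
  else []

-- ===== PRECONDITION & SPEC =====
-- Pre_ excludes exactly the inputs on which the Python A raises: a failing assert
-- (len(X) ≠ len(y)*sequence_size → AssertionError), and n = 0 or sequence_size = 0
-- (a zero range step → ValueError).  A returns normally on everything Pre_ admits.
def Pre_nn_batchs (X : List Int) (y : List Int) (n : Int) (sequence_size : Int) : Prop :=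
  (X.length : Int) = (y.length : Int) * sequence_size ∧ n ≠ 0 ∧ sequence_size ≠ 0
instance (X : List Int) (y : List Int) (n : Int) (sequence_size : Int) : Decidable (Pre_nn_batchs X y n sequence_size) := by unfold Pre_nn_batchs; infer_instance

def pvWitness_nn_batchs : List Int × List Int × Int × Int := ([1, 2, 3, 4, 5, 6], [10, 20, 30], 2, 2)

def Spec_nn_batchs (X : List Int) (y : List Int) (n : Int) (sequence_size : Int) (out : List (List Int × List Int)) : Prop := out = nn_batchs_alt X y n sequence_size
instance (X : List Int) (y : List Int) (n : Int) (sequence_size : Int) (out : List (List Int × List Int)) : Decidable (Spec_nn_batchs X y n sequence_size out) := by unfold Spec_nn_batchs; infer_instance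

-- ===== CLAIM (what is proved, stated in full; the proofs are below) =====
def Claim_equal_nn_batchs : Prop := ∀ (X : List Int) (y : List Int) (n : Int) (sequence_size : Int), Dom_nn_batchs X y n sequence_size → Pre_nn_batchs X y n sequence_size → Spec_nn_batchs X y n sequence_size (nn_batchs X y n sequence_size)

-- ===== LEMMAS AND PROOFS =====

theorem pyRange_self (a m : Int) : PySem.List.pyRange a a m = [] := by
  simp [PySem.List.pyRange]

theorem pyRange_nil_of_pos {a b m : Int} (hm : 0 < m) (h : b ≤ a) :
    PySem.List.pyRange a b m = [] := by
  simp [PySem.List.pyRange, hm.ne', hm, not_lt.mpr h]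

theorem pyRange_nil_of_neg {a b m : Int} (hm : m < 0) (h : a ≤ b) :
    PySem.List.pyRange a b m = [] := by
  simp [PySem.List.pyRange, hm.ne, not_lt.mpr hm.le, not_lt.mpr h]

theorem pyRange_cons_of_pos {a b m : Int} (hm : 0 < m) (h : a < b) :
    PySem.List.pyRange a b m = a :: PySem.List.pyRange (a + m) b m := by
  simp only [PySem.List.pyRange, if_neg hm.ne', if_pos hm, if_pos h]
  have hc : (b - a + m - 1) / m = (b - a - 1) / m + 1 := by
    have := Int.add_mul_ediv_right (b - a - 1) 1 hm.ne'
    rw [one_mul] at this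
    rw [← this]; ring_nf
  have hnn : 0 ≤ (b - a - 1) / m := Int.ediv_nonneg (by omega) hm.le
  have hcn : ((b - a + m - 1) / m).toNat = ((b - a - 1) / m).toNat + 1 := by omega
  rw [hcn, List.range_succ_eq_map, List.map_cons, List.map_map]
  refine List.cons_eq_cons.mpr ⟨by simp, ?_⟩
  by_cases h2 : a + m < b
  · rw [if_pos h2]
    have hdd : (b - (a + m) + m - 1) / m = (b - a - 1) / m := by ring_nf
    rw [hdd]
    apply List.map_congr_left
    intro k _
    simp only [Function.comp]
    push_cast
    ring
  · rw [if_neg h2]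
    have hz : (b - a - 1) / m = 0 :=
      Int.ediv_eq_zero_of_lt (by omega) (by omega)
    simp [hz]

theorem rangeScale (s m : Int) (hs : 0 < s) (hm : 0 < m) :
    ∀ (k : Nat) (a b : Int), (b - a).toNat ≤ k →
      PySem.List.pyRange (a * s) (b * s) (m * s) = (PySem.List.pyRange a b m).map (· * s) := by
  intro k
  induction k with
  | zero =>
    intro a b hk
    have hba : b ≤ a := by omega
    rw [pyRange_nil_of_pos (by positivity) (by nlinarith), pyRange_nil_of_pos hm hba]
    rfl
  | succ k ih =>
    intro a b hk
    by_cases h : a < b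
    · rw [pyRange_cons_of_pos hm h,
        pyRange_cons_of_pos (by positivity) (by nlinarith : a * s < b * s),
        List.map_cons]
      have harg : a * s + m * s = (a + m) * s := by ring
      rw [harg, ih (a + m) b (by omega)]
    · rw [pyRange_nil_of_pos (by positivity) (by nlinarith : b * s ≤ a * s),
        pyRange_nil_of_pos hm (by omega)]
      rfl

theorem rangeShift (t m : Int) (hm : 0 < m) :
    ∀ (k : Nat) (a b : Int), (b - a).toNat ≤ k →
      PySem.List.pyRange (a + t) (b + t) m = (PySem.List.pyRange a b m).map (· + t) := by
  intro k
  induction k with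
  | zero =>
    intro a b hk
    rw [pyRange_nil_of_pos hm (by omega), pyRange_nil_of_pos hm (by omega)]
    rfl
  | succ k ih =>
    intro a b hk
    by_cases h : a < b
    · rw [pyRange_cons_of_pos hm h, pyRange_cons_of_pos hm (by omega : a + t < b + t),
        List.map_cons]
      have harg : a + t + m = a + m + t := by ring
      rw [harg, ih (a + m) b (by omega)]
    · rw [pyRange_nil_of_pos hm (by omega), pyRange_nil_of_pos hm (by omega)]
      rfl

theorem clampIdx_min_len (len : Nat) (b : Int) :
    PySem.List.clampIdx len (min b (len : Int)) = PySem.List.clampIdx len b := by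
  simp only [PySem.List.clampIdx]
  split_ifs <;> omega

theorem slice_min_len (xs : List Int) (a b : Int) :
    PySem.List.slice xs (some a) (some (min b (xs.length : Int))) =
      PySem.List.slice xs (some a) (some b) := by
  simp only [PySem.List.slice, clampIdx_min_len]

-- slicing a suffix: xs[a+k : b+k] = (xs drop k)[a : b]  (natural bounds)
theorem slice_shift (xs : List Int) (k a b : Nat) :
    PySem.List.slice xs (some ((a : Int) + (k : Int))) (some ((b : Int) + (k : Int))) =
      PySem.List.slice (xs.drop k) (some (a : Int)) (some (b : Int)) := by
  have h1 : (a : Int) + (k : Int) = ((a + k : Nat) : Int) := by push_cast; ring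
  have h2 : (b : Int) + (k : Int) = ((b + k : Nat) : Int) := by push_cast; ring
  rw [h1, h2, PySem.List.slice_natCast, PySem.List.slice_natCast, List.drop_drop]
  have : b + k - (a + k) = b - a := by omega
  rw [this]
  have : a + k = k + a := by omega
  rw [this]

-- the B-loop equals the index-map form (for positive Nat counts)
theorem chunks_eq (nn ss : Nat) (hn : 0 < nn) :
    ∀ (k : Nat) (y X : List Int), y.length ≤ k →
      nnChunks (nn * ss) nn X y =
      (PySem.List.pyRange 0 (y.length : Int) (nn : Int)).map
        (fun idx => (PySem.List.slice X (some (idx * (ss : Int))) (some ((idx + (nn : Int)) * (ss : Int))),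
                     PySem.List.slice y (some idx) (some (idx + (nn : Int))))) := by
  intro k
  induction k with
  | zero =>
    intro y X hk
    have hy : y = [] := List.eq_nil_of_length_eq_zero (by omega)
    subst hy
    rw [nnChunks]
    simp [pyRange_self]
  | succ k ih =>
    intro y X hk
    by_cases hy : y = []
    · subst hy
      rw [nnChunks]
      simp [pyRange_self]
    · have hlen : 0 < y.length := List.length_pos_iff.mpr hy
      rw [nnChunks, if_neg (by simp [hy, hn.ne'])]
      rw [pyRange_cons_of_pos (by exact_mod_cast hn) (by exact_mod_cast hlen), List.map_cons]
      refine List.cons_eq_cons.mpr ⟨?_, ?_⟩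
      · -- head: idx = 0
        simp only [zero_mul, zero_add]
        rw [show ((nn : Int) * (ss : Int)) = ((nn * ss : Nat) : Int) by push_cast; ring]
        rw [PySem.List.slice_zero_start, PySem.List.slice_zero_start,
          PySem.List.slice_to_natCast, PySem.List.slice_to_natCast]
      · -- tail
        have hshift : PySem.List.pyRange (0 + (nn : Int)) (((y.length - nn : Int)) + (nn : Int)) (nn : Int)
            = (PySem.List.pyRange 0 ((y.length : Int) - (nn : Int)) (nn : Int)).map (· + (nn : Int)) :=
          rangeShift (nn : Int) (nn : Int) (by exact_mod_cast hn) y.length 0 _ (by omega)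
        have harg : (0 : Int) + (nn : Int) = (nn : Int) := by ring
        have harg2 : ((y.length : Int) - (nn : Int)) + (nn : Int) = (y.length : Int) := by ring
        rw [harg, harg2] at hshift
        rw [harg, hshift, List.map_map]
        by_cases hle : y.length ≤ nn
        · -- dropped y is empty: both sides are []
          have h1 : PySem.List.pyRange 0 ((y.length : Int) - (nn : Int)) (nn : Int) = [] :=
            pyRange_nil_of_pos (by exact_mod_cast hn) (by omega)
          have h2 : y.drop nn = [] := List.drop_eq_nil_of_le hle
          rw [h1, h2, nnChunks]
          simp
        · rw [ih (y.drop nn) (X.drop (nn * ss)) (by simp; omega)]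
          have hylen : ((y.drop nn).length : Int) = (y.length : Int) - (nn : Int) := by
            simp; omega
          rw [hylen]
          apply List.map_congr_left
          intro idx hidx
          have hidx0 : 0 ≤ idx :=
            ((PySem.List.mem_pyRange_iff_of_pos (by exact_mod_cast hn) idx).mp hidx).1
          obtain ⟨j, rfl⟩ : ∃ j : Nat, idx = (j : Int) := ⟨idx.toNat, (Int.toNat_of_nonneg hidx0).symm⟩
          simp only [Function.comp]
          refine Prod.ext ?_ ?_
          · dsimp only
            symm
            have e1 : ((j : Int) + (nn : Int)) * (ss : Int) = ((j * ss : Nat) : Int) + ((nn * ss : Nat) : Int) := by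
              push_cast; ring
            have e2 : (((j : Int) + (nn : Int)) + (nn : Int)) * (ss : Int)
                = (((j + nn) * ss : Nat) : Int) + ((nn * ss : Nat) : Int) := by push_cast; ring
            rw [e1, e2, slice_shift X (nn * ss) (j * ss) ((j + nn) * ss)]
            congr 2
          · dsimp only
            symm
            have e2 : ((j : Int) + (nn : Int)) + (nn : Int) = ((j + nn : Nat) : Int) + (nn : Int) := by
              push_cast; ring
            rw [e2, slice_shift y nn j (j + nn)]
            congr 2

-- ===== VERDICT (by name: the statement is the Claim_ definition above) =====
theorem nn_batchs_spec : Claim_equal_nn_batchs := by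
  intro X y n s _ hpre
  obtain ⟨heq, hn, hs⟩ := hpre
  unfold Spec_nn_batchs nn_batchs nn_batchs_alt batchPy
  simp only []
  rcases lt_or_gt_of_ne hs with hsneg | hspos
  · -- sequence_size < 0 forces len(y) = 0 (hence len(X) = 0): both sides are []
    have hy0 : (y.length : Int) = 0 := by nlinarith [Int.natCast_nonneg y.length]
    have hx0 : (X.length : Int) = 0 := by rw [heq, hy0]; ring
    rw [if_neg (by omega)]
    simp [hy0, hx0, pyRange_self]
  · rcases lt_or_gt_of_ne hn with hnneg | hnpos
    · -- n < 0: both ranges are empty, B's guard is false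
      have h1 : PySem.List.pyRange 0 (X.length : Int) (n * s) = [] :=
        pyRange_nil_of_neg (by nlinarith) (Int.natCast_nonneg _)
      have h2 : PySem.List.pyRange 0 (y.length : Int) n = [] :=
        pyRange_nil_of_neg hnneg (Int.natCast_nonneg _)
      rw [h1, h2, if_neg (by omega)]
      simp
    · -- main case: 0 < n, 0 < s
      obtain ⟨nn, rfl⟩ : ∃ m : Nat, n = (m : Int) := ⟨n.toNat, (Int.toNat_of_nonneg hnpos.le).symm⟩
      obtain ⟨ss, rfl⟩ : ∃ m : Nat, s = (m : Int) := ⟨s.toNat, (Int.toNat_of_nonneg hspos.le).symm⟩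
      rw [if_pos ⟨hnpos, hspos⟩]
      have hscale : PySem.List.pyRange 0 (X.length : Int) ((nn : Int) * (ss : Int)) =
          (PySem.List.pyRange 0 (y.length : Int) (nn : Int)).map (· * (ss : Int)) := by
        rw [heq]
        have h := rangeScale (ss : Int) (nn : Int) hspos hnpos (y.length + 1) 0 (y.length : Int) (by omega)
        rw [zero_mul] at h
        exact h
      rw [hscale, List.map_map, List.zip_map']
      have hnnat : ((nn : Int) * (ss : Int)).toNat = nn * ss := by
        rw [show ((nn : Int) * (ss : Int)) = ((nn * ss : Nat) : Int) by push_cast; ring, Int.toNat_natCast]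
      rw [hnnat, Int.toNat_natCast,
        chunks_eq nn ss (by exact_mod_cast hnpos) y.length y X le_rfl]
      apply List.map_congr_left
      intro idx _
      simp only [Function.comp]
      have hX : min (idx * (ss : Int) + (nn : Int) * (ss : Int)) (X.length : Int)
          = min ((idx + (nn : Int)) * (ss : Int)) (X.length : Int) := by ring_nf
      rw [hX, slice_min_len, slice_min_len]
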